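-- pv_equiv track=rewrite | github.com/galalqassas/autoAgenticTesting | src/extension/GUI/widgets/coverage_viewer.py | _format_line_ranges
-- ===== SOURCE A (Python) =====
-- from typing import Dict, List, Optional
--
-- def _format_line_ranges(lines: List[int], limit: int = 5) -> str:
--     """Format line numbers into condensed ranges."""
--     if not lines:
--         return ""
--     ranges, start, end = [], lines[0], lines[0]
--     for ln in lines[1:]:
--         if ln == end + 1:
--             end = ln
--         else:
--             ranges.append(f"{start}-{end}" if start != end else str(start))
--             start = end = ln
--     ranges.append(f"{start}-{end}" if start != end else str(start))
--     return ", ".join(ranges[:limit]) + ("..." if len(ranges) > limit else "")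
-- ===== SOURCE B (Python) =====
-- # B: two-phase rewrite — an explicit stack (reversed list, pop from the end)
-- # extracts maximal consecutive runs as (start, end) pairs, then a separate
-- # comprehension formats them; A instead formats inline in one stateful loop.
-- def _format_line_ranges(lines, limit=5):
--     """Format line numbers into condensed ranges."""
--     if not lines:
--         return ""
--     stack = lines[::-1]  # top of stack = next unprocessed line
--     runs = []
--     while stack:
--         start = prev = stack.pop()
--         while stack and stack[-1] == prev + 1:
--             prev = stack.pop()
--         runs.append((start, prev))
--     ranges = [f"{s}-{e}" if s != e else str(s) for s, e in runs]
--     return ", ".join(ranges[:limit]) + ("..." if len(ranges) > limit else "")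
-- ===== Notes on version B (the rewrite author's own statement) =====
-- stated objective: alternative
-- what changed: Replaces A's single stateful loop that formats ranges inline with a two-phase design: an explicit stack (reversed list, pop from the end) extracts maximal consecutive runs as (start,end) pairs, then a separate comprehension formats them.
import Mathlib
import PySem

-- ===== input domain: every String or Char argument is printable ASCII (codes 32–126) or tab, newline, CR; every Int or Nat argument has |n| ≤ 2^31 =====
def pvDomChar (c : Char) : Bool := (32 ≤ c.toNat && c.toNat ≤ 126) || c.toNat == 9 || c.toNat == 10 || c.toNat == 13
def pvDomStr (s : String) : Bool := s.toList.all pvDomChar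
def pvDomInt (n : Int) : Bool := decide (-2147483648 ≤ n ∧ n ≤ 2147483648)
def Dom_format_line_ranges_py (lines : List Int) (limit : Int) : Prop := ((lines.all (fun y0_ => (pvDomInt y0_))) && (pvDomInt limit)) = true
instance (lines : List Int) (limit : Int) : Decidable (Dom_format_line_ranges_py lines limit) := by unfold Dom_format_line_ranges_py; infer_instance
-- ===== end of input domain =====

-- B extracts maximal consecutive runs with an explicit stack and formats them in a
-- separate phase; A formats inline in one stateful loop. Objective: alternative decomposition.

-- f"{start}-{end}" if start != end else str(start)  (the f-string A uses twice, and B's comprehension body)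
def pvFmtRange (s e : Int) : String :=
  if s ≠ e then PySem.Int.toStr s ++ "-" ++ PySem.Int.toStr e else PySem.Int.toStr s

-- ===== PORT A =====
-- the 'for ln in lines[1:]' loop over state (ranges, start, end), plus the final append
def pvLoopA : List Int → List String → Int → Int → List String
  | [], ranges, s, e => ranges ++ [pvFmtRange s e]
  | ln :: rest, ranges, s, e =>
      if ln = e + 1 then pvLoopA rest ranges s ln
      else pvLoopA rest (ranges ++ [pvFmtRange s e]) ln ln

def format_line_ranges_py (lines : List Int) (limit : Int) : String :=
  match lines with
  | [] => ""   -- if not lines: return ""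
  | x :: rest =>
      let ranges := pvLoopA rest [] x x
      PySem.Str.join ", " (PySem.List.slice ranges none (some limit)) ++
        (if (ranges.length : Int) > limit then "..." else "")

-- ===== PORT B =====
-- B's stack is lines[::-1] with pop() from the end; here the stack is modeled
-- top-first (pop = take the head), so 'lines[::-1] then pop from the end' is
-- exactly consuming `lines` front to back — same pops, same order, exact.
-- inner while: pop while the top continues the run; returns (prev, remaining stack)
def pvEatRun (prev : Int) : List Int → Int × List Int
  | [] => (prev, [])
  | t :: rest => if t = prev + 1 then pvEatRun t rest else (prev, t :: rest)

theorem pvEatRun_length (ls : List Int) : ∀ prev : Int, (pvEatRun prev ls).2.length ≤ ls.length := by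
  induction ls with
  | nil => intro prev; simp [pvEatRun]
  | cons t rest ih =>
      intro prev
      simp only [pvEatRun]
      split
      · exact le_trans (ih t) (Nat.le_succ _)
      · simp

-- outer while: one run per iteration
def pvRunsB : List Int → List (Int × Int)
  | [] => []
  | x :: stack =>
      let r := pvEatRun x stack
      (x, r.1) :: pvRunsB r.2
termination_by stack => stack.length
decreasing_by
  simpa using Nat.lt_succ_of_le (pvEatRun_length stack x)

def format_line_ranges_py_alt (lines : List Int) (limit : Int) : String :=
  match lines with
  | [] => ""   -- if not lines: return ""
  | _ :: _ =>
      let ranges := (pvRunsB lines).map (fun p => pvFmtRange p.1 p.2)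
      PySem.Str.join ", " (PySem.List.slice ranges none (some limit)) ++
        (if (ranges.length : Int) > limit then "..." else "")

-- ===== PRECONDITION & SPEC =====
def Spec_format_line_ranges_py (lines : List Int) (limit : Int) (out : String) : Prop := out = format_line_ranges_py_alt lines limit
instance (lines : List Int) (limit : Int) (out : String) : Decidable (Spec_format_line_ranges_py lines limit out) := by unfold Spec_format_line_ranges_py; infer_instance

-- ===== CLAIM (what is proved, stated in full; the proofs are below) =====
def Claim_equal_format_line_ranges_py : Prop := ∀ (lines : List Int) (limit : Int), Dom_format_line_ranges_py lines limit → Spec_format_line_ranges_py lines limit (format_line_ranges_py lines limit)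

-- ===== LEMMAS AND PROOFS =====

-- A's loop equals B's runs-then-format, relative to the pending run (s, …, e)
theorem pvLoopA_eq (ls : List Int) : ∀ (ranges : List String) (s e : Int),
    pvLoopA ls ranges s e =
      ranges ++ ((s, (pvEatRun e ls).1) :: pvRunsB (pvEatRun e ls).2).map
        (fun p => pvFmtRange p.1 p.2) := by
  induction ls with
  | nil => intro ranges s e; simp [pvLoopA, pvEatRun, pvRunsB]
  | cons l rest ih =>
      intro ranges s e
      simp only [pvLoopA, pvEatRun]
      by_cases h : l = e + 1
      · simp [h, ih]
      · simp only [h, if_false]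
        rw [ih]
        simp [pvRunsB, List.append_assoc]

theorem runs_eq (x : Int) (rest : List Int) :
    (pvRunsB (x :: rest)).map (fun p => pvFmtRange p.1 p.2) = pvLoopA rest [] x x := by
  rw [pvLoopA_eq]
  simp [pvRunsB]

-- ===== VERDICT (by name: the statement is the Claim_ definition above) =====
theorem format_line_ranges_py_spec : Claim_equal_format_line_ranges_py := by
  intro lines limit _
  unfold Spec_format_line_ranges_py format_line_ranges_py format_line_ranges_py_alt
  cases lines with
  | nil => rfl
  | cons x rest => rw [runs_eq]
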